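-- pv_equiv track=rewrite | github.com/Kalaww/buenosaires_parser | src/magic.py | setup_features_words
-- ===== SOURCE A (Python) =====
-- def setup_features_words(words):
--     results = []
--     for i, (word, tag, next) in enumerate(words):
--         before = ''
--         before_tag = 'other'
--         if i > 0:
--             before = words[i - 1][0]
--             before_tag = words[i - 1][1]
--         after = ''
--         after_tag = 'other'
--         if i < len(words) - 1:
--             after = words[i + 1][0]
--             after_tag = words[i + 1][1]
--         results.append(
--             ({
--                  'word': word,
--                  'before': before,
--                  'after': after,
--                  'before_tag': before_tag,
--                  'after_tag': after_tag
--              }, tag, next)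
--         )
--     return results
-- ===== SOURCE B (Python) =====
-- def setup_features_words(words):
--     results = []
--     it = iter(words)
--     prev = ('', 'other')
--     cur = next(it, None)
--     while cur is not None:
--         word, tag, nxt_label = cur
--         lookahead = next(it, None)
--         if lookahead is None:
--             after, after_tag = '', 'other'
--         else:
--             after, after_tag = lookahead[0], lookahead[1]
--         results.append(
--             ({
--                  'word': word,
--                  'before': prev[0],
--                  'after': after,
--                  'before_tag': prev[1],
--                  'after_tag': after_tag
--              }, tag, nxt_label)
--         )
--         prev = (word, tag)
--         cur = lookahead
--     return results
-- ===== Notes on version B (the rewrite author's own statement) =====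
-- stated objective: alternative
-- what changed: Replaces A's enumerate loop with endpoint if-branches and random-access words[i-1]/words[i+1] lookups by a streaming iterator pass that carries the previous (word, tag) context in an accumulator and uses a one-element lookahead for the next context, never indexing the list.
import Mathlib
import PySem

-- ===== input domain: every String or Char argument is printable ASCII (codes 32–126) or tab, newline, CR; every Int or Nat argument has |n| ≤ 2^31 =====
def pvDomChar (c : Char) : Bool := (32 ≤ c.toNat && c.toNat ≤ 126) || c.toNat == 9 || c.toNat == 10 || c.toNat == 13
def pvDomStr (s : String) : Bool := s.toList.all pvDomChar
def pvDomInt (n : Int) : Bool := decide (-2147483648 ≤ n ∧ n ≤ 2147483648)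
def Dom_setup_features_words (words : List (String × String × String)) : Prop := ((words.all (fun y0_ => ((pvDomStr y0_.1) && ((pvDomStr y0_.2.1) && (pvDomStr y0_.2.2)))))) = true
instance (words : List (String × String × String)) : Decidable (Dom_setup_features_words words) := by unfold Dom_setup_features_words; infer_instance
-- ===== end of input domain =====

-- B replaces A's indexed loop and endpoint guards by a streaming pass that carries the
-- previous (word, tag) context and reads the next context via one-element lookahead
-- (objective: alternative).

-- ===== PORT A =====
-- literal port of A: enumerate loop, endpoint guards, indexed neighbor access (always in range under the guards)
def setup_features_words (words : List (String × String × String)) : List ((List (String × String)) × String × String) :=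
  (PySem.List.enumerate words).foldl (fun results x =>
    let i := x.1
    let word := x.2.1
    let tag := x.2.2.1
    let next := x.2.2.2
    let before := if i > 0 then (PySem.List.pyGetD words (i - 1) ("", "", "")).1 else ""
    let before_tag := if i > 0 then (PySem.List.pyGetD words (i - 1) ("", "", "")).2.1 else "other"
    let after := if i < (words.length : Int) - 1 then (PySem.List.pyGetD words (i + 1) ("", "", "")).1 else ""
    let after_tag := if i < (words.length : Int) - 1 then (PySem.List.pyGetD words (i + 1) ("", "", "")).2.1 else "other"
    results ++ [([("word", word), ("before", before), ("after", after),
                  ("before_tag", before_tag), ("after_tag", after_tag)], tag, next)]) []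

-- ===== PORT B =====
-- Source B's iterator loop, transcribed as structural recursion on the remaining list:
-- 'prev' is the carried (word, tag) of the previous element, the lookahead is the head
-- of the remaining list
def setupGo (prev : String × String) : List (String × String × String) → List ((List (String × String)) × String × String)
  | [] => []
  | (word, tag, next) :: rest =>
    let a : String × String := match rest with
      | [] => ("", "other")
      | (w2, t2, _) :: _ => (w2, t2)
    ([("word", word), ("before", prev.1), ("after", a.1),
      ("before_tag", prev.2), ("after_tag", a.2)], tag, next) :: setupGo (word, tag) rest

def setup_features_words_alt (words : List (String × String × String)) : List ((List (String × String)) × String × String) :=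
  setupGo ("", "other") words

-- ===== PRECONDITION & SPEC =====
def Spec_setup_features_words (words : List (String × String × String)) (out : List ((List (String × String)) × String × String)) : Prop := out = setup_features_words_alt words
instance (words : List (String × String × String)) (out : List ((List (String × String)) × String × String)) : Decidable (Spec_setup_features_words words out) := by unfold Spec_setup_features_words; infer_instance

-- ===== CLAIM (what is proved, stated in full; the proofs are below) =====
def Claim_equal_setup_features_words : Prop := ∀ (words : List (String × String × String)), Dom_setup_features_words words → Spec_setup_features_words words (setup_features_words words)

-- ===== LEMMAS AND PROOFS =====

theorem setupGo_length (prev : String × String) (ws : List (String × String × String)) :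
    (setupGo prev ws).length = ws.length := by
  induction ws generalizing prev with
  | nil => rfl
  | cons h t ih => simp [setupGo, ih]

theorem setupGo_getElem (ws : List (String × String × String)) (prev : String × String)
    (i : Nat) (h : i < ws.length) :
    (setupGo prev ws)[i]'(by rw [setupGo_length]; exact h) =
      ([("word", ws[i].1),
        ("before", if i = 0 then prev.1 else (ws[i-1]'(by omega)).1),
        ("after", ((ws[i+1]?).map (fun w => w.1)).getD ""),
        ("before_tag", if i = 0 then prev.2 else (ws[i-1]'(by omega)).2.1),
        ("after_tag", ((ws[i+1]?).map (fun w => w.2.1)).getD "other")],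
       ws[i].2.1, ws[i].2.2) := by
  induction ws generalizing prev i with
  | nil => simp at h
  | cons hd t ih =>
    obtain ⟨w, tg, nx⟩ := hd
    cases i with
    | zero =>
      cases t with
      | nil => simp [setupGo]
      | cons h2 t2 => obtain ⟨w2, t2', n2⟩ := h2; simp [setupGo]
    | succ j =>
      have hj : j < t.length := by simpa using h
      have := ih (w, tg) j hj
      simp only [setupGo, List.getElem_cons_succ]
      rw [this]
      cases j with
      | zero => simp
      | succ k => simp

theorem setup_main (words : List (String × String × String)) :
    setup_features_words words = setup_features_words_alt words := by
  unfold setup_features_words setup_features_words_alt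
  rw [PySem.List.foldl_append_singleton_eq_map, List.nil_append]
  apply List.ext_getElem
  · rw [setupGo_length]; simp
  · intro i h1 h2
    have hi : i < words.length := by simpa using h1
    rw [setupGo_getElem words ("", "other") i hi]
    simp only [List.getElem_map, PySem.List.getElem_enumerate, zero_add]
    by_cases h0 : i = 0
    · subst h0
      by_cases hl : 1 < words.length
      · have c1 : ¬ ((0 : Int) > 0) := by omega
        have c2 : (0 : Int) < (words.length : Int) - 1 := by omega
        simp only [if_neg c1, if_pos c2, Nat.cast_zero, zero_add,
          PySem.List.pyGetD_ofNat' words 1 ("", "", ""),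
          List.getElem?_eq_getElem hl]
        simp [hl]
      · have c2 : ¬ ((0 : Int) < (words.length : Int) - 1) := by omega
        simp [hl]
    · have c1 : (i : Int) > 0 := by omega
      rw [show ((i : Int) - 1) = ((i - 1 : Nat) : Int) from by omega,
          PySem.List.pyGetD_natCast words (i - 1) ("", "", "")]
      by_cases hl : i + 1 < words.length
      · have c2 : (i : Int) < (words.length : Int) - 1 := by omega
        rw [show ((i : Int) + 1) = ((i + 1 : Nat) : Int) from by omega,
            PySem.List.pyGetD_natCast words (i + 1) ("", "", "")]
        simp [c2, h0, List.getElem?_eq_getElem hl,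
          List.getElem?_eq_getElem (show i - 1 < words.length by omega)]
      · have c2 : ¬ ((i : Int) < (words.length : Int) - 1) := by omega
        have hn : words[i+1]? = none := by
          rw [List.getElem?_eq_none]; omega
        simp [c2, h0, hn,
          List.getElem?_eq_getElem (show i - 1 < words.length by omega)]

-- ===== VERDICT (by name: the statement is the Claim_ definition above) =====
theorem setup_features_words_spec : Claim_equal_setup_features_words := by
  intro words _
  unfold Spec_setup_features_words
  exact setup_main words
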